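-- pv_equiv track=rewrite | github.com/wang2929/tiffany-personal-algorithms | leetcode/biweekly-contest-177/MergeCloseCharacters.py | mergeCharacters
-- ===== SOURCE A (Python) =====
-- def mergeCharacters(s: str, k: int) -> str:
--     s = list(s)
--     while True:
--         finished = True
--         tracker = {}
--         for i in range(len(s)):
--             if s[i] not in tracker:
--                 tracker[s[i]] = i
--             elif (i - tracker[s[i]]) <= k:
--                     del s[i]
--                     finished = False
--                     break
--             else:
--                 tracker[s[i]] = i
--         if finished: break
--     return ''.join(s)
-- ===== SOURCE B (Python) =====
-- def mergeCharacters(s: str, k: int) -> str: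
--     res = []
--     last = {}
--     for c in s:
--         j = last.get(c)
--         if j is not None and len(res) - j <= k:
--             continue
--         last[c] = len(res)
--         res.append(c)
--     return ''.join(res)
-- ===== Notes on version B (the rewrite author's own statement) =====
-- stated objective: faster
-- what changed: A's delete-one-and-rescan-from-scratch fixpoint loop is replaced by a single left-to-right pass that builds the result while a dict tracks each character's last kept index.
import Mathlib
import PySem

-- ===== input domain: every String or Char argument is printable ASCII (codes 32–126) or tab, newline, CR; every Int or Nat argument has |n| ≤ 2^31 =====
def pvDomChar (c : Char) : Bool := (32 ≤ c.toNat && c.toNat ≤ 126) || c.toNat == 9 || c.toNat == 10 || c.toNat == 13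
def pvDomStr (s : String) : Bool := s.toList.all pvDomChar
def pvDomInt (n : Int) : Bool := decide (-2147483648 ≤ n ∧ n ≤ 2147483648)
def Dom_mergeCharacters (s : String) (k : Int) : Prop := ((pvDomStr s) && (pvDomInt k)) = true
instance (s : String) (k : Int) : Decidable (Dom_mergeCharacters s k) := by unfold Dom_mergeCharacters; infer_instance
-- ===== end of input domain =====

-- B replaces A's delete-and-restart fixpoint loop (O(n^2)) by a single left-to-right pass
-- keeping a dict of each character's last kept index (objective: faster, asymptotic).

-- ===== PORT A =====
-- the inner `for i in range(len(s))` scan: returns some i for the `del s[i]; break` branch,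
-- none when the scan finishes (`finished` stays True)
def scanA (k : Int) (t : PySem.Dict Char Int) (i : Nat) : List Char → Option Nat
  | [] => none
  | c :: rest =>
    match t.get? c with
    | none => scanA k (t.insert c (i : Int)) (i + 1) rest
    | some j => if (i : Int) - j ≤ k then some i
                else scanA k (t.insert c (i : Int)) (i + 1) rest

-- needed by loopA's termination proof (scan only deletes at an index inside the list)
theorem scanA_lt (k : Int) : ∀ (cs : List Char) (t : PySem.Dict Char Int) (i m : Nat),
    scanA k t i cs = some m → m < i + cs.length := by
  intro cs
  induction cs with
  | nil => intro t i m h; simp [scanA] at h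
  | cons c rest ih =>
    intro t i m h
    rw [scanA] at h
    split at h
    · have := ih _ _ _ h; simp only [List.length_cons]; omega
    · split at h
      · injection h with h'; subst h'; simp only [List.length_cons]; omega
      · have := ih _ _ _ h; simp only [List.length_cons]; omega

-- the `while True:` loop: rescan from scratch after every deletion
def loopA (k : Int) (s : List Char) : List Char :=
  match h : scanA k PySem.Dict.empty 0 s with
  | none => s
  | some m => loopA k (s.eraseIdx m)
  termination_by s.length
  decreasing_by
    have hm : m < s.length := by simpa using scanA_lt k s PySem.Dict.empty 0 m h
    simp [List.length_eraseIdx, hm]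
    omega

def mergeCharacters (s : String) (k : Int) : String := String.ofList (loopA k s.toList)

-- ===== PORT B =====
def goB (k : Int) (last : PySem.Dict Char Int) (res : List Char) : List Char → List Char
  | [] => res
  | c :: rest =>
    match last.get? c with
    | some j => if (res.length : Int) - j ≤ k then goB k last res rest
                else goB k (last.insert c (res.length : Int)) (res ++ [c]) rest
    | none => goB k (last.insert c (res.length : Int)) (res ++ [c]) rest

def mergeCharacters_alt (s : String) (k : Int) : String :=
  String.ofList (goB k PySem.Dict.empty [] s.toList)

-- ===== PRECONDITION & SPEC =====
def Spec_mergeCharacters (s : String) (k : Int) (out : String) : Prop := out = mergeCharacters_alt s k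
instance (s : String) (k : Int) (out : String) : Decidable (Spec_mergeCharacters s k out) := by unfold Spec_mergeCharacters; infer_instance

-- ===== CLAIM (what is proved, stated in full; the proofs are below) =====
def Claim_equal_mergeCharacters : Prop := ∀ (s : String) (k : Int), Dom_mergeCharacters s k → Spec_mergeCharacters s k (mergeCharacters s k)

-- ===== LEMMAS AND PROOFS =====

-- tracker accumulated by a clean (deletion-free) scan over a prefix
def trk (t : PySem.Dict Char Int) (i : Nat) : List Char → PySem.Dict Char Int
  | [] => t
  | c :: rest => trk (t.insert c (i : Int)) (i + 1) rest

theorem trk_append (c : Char) : ∀ (res : List Char) (t : PySem.Dict Char Int) (i : Nat),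
    trk t i (res ++ [c]) = (trk t i res).insert c ((i + res.length : Nat) : Int) := by
  intro res
  induction res with
  | nil => intro t i; simp [trk]
  | cons d rest ih =>
    intro t i
    simp only [List.cons_append, trk, ih]
    congr 2
    simp only [List.length_cons]
    omega

theorem scanA_append (k : Int) : ∀ (res rest : List Char) (t : PySem.Dict Char Int) (i : Nat),
    scanA k t i res = none →
    scanA k t i (res ++ rest) = scanA k (trk t i res) (i + res.length) rest := by
  intro res
  induction res with
  | nil => intro rest t i _; simp [trk]
  | cons c res' ih =>
    intro rest t i h
    rw [scanA] at h
    rw [List.cons_append, scanA]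
    cases hg : t.get? c with
    | none =>
      simp only [hg] at h ⊢
      rw [ih _ _ _ h]
      simp only [trk, List.length_cons]
      congr 1
      omega
    | some j =>
      simp only [hg] at h ⊢
      split at h
      · simp at h
      · rename_i hle
        rw [if_neg hle, ih _ _ _ h]
        simp only [trk, List.length_cons]
        congr 1
        omega

theorem eraseIdx_mid (c : Char) : ∀ (res rest : List Char),
    (res ++ c :: rest).eraseIdx res.length = res ++ rest := by
  intro res
  induction res with
  | nil => intro rest; simp
  | cons d res' ih => intro rest; simp [ih]

theorem main_lemma (k : Int) : ∀ (rest res : List Char),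
    scanA k PySem.Dict.empty 0 res = none →
    loopA k (res ++ rest) = goB k (trk PySem.Dict.empty 0 res) res rest := by
  intro rest
  induction rest with
  | nil =>
    intro res h
    rw [List.append_nil, goB, loopA]
    split
    · rfl
    · rename_i m heq
      rw [h] at heq
      simp at heq
  | cons c rest' ih =>
    intro res h
    have hsc := scanA_append k res (c :: rest') PySem.Dict.empty 0 h
    simp only [Nat.zero_add] at hsc
    cases hg : (trk PySem.Dict.empty 0 res).get? c with
    | some j =>
      by_cases hle : (res.length : Int) - j ≤ k
      · -- deletion branch: unfold loopA once, erase the middle char, recurse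
        have hB : goB k (trk PySem.Dict.empty 0 res) res (c :: rest')
            = goB k (trk PySem.Dict.empty 0 res) res rest' := by
          simp [goB, hg, hle]
        rw [hB]
        have hsome : scanA k PySem.Dict.empty 0 (res ++ c :: rest') = some res.length := by
          rw [hsc, scanA]
          simp [hg, hle]
        rw [loopA]
        split
        · rename_i heq
          rw [hsome] at heq
          simp at heq
        · rename_i m heq
          rw [hsome] at heq
          injection heq with hm
          subst hm
          rw [eraseIdx_mid]
          exact ih res h
      · -- kept, seen before: fold c into the clean prefix
        have hB : goB k (trk PySem.Dict.empty 0 res) res (c :: rest')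
            = goB k ((trk PySem.Dict.empty 0 res).insert c (res.length : Int)) (res ++ [c]) rest' := by
          simp [goB, hg, hle]
        rw [hB]
        have hclean : scanA k PySem.Dict.empty 0 (res ++ [c]) = none := by
          rw [scanA_append k res [c] PySem.Dict.empty 0 h, scanA]
          simp [hg, hle, scanA]
        have h2 := ih (res ++ [c]) hclean
        rw [trk_append] at h2
        simp only [Nat.zero_add, List.append_assoc, List.singleton_append] at h2
        exact h2
    | none =>
      -- kept, first occurrence: fold c into the clean prefix
      have hB : goB k (trk PySem.Dict.empty 0 res) res (c :: rest')
          = goB k ((trk PySem.Dict.empty 0 res).insert c (res.length : Int)) (res ++ [c]) rest' := by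
        simp [goB, hg]
      rw [hB]
      have hclean : scanA k PySem.Dict.empty 0 (res ++ [c]) = none := by
        rw [scanA_append k res [c] PySem.Dict.empty 0 h, scanA]
        simp [hg, scanA]
      have h2 := ih (res ++ [c]) hclean
      rw [trk_append] at h2
      simp only [Nat.zero_add, List.append_assoc, List.singleton_append] at h2
      exact h2

-- ===== VERDICT (by name: the statement is the Claim_ definition above) =====
theorem mergeCharacters_spec : Claim_equal_mergeCharacters := by
  intro s k _
  unfold Spec_mergeCharacters mergeCharacters mergeCharacters_alt
  have := main_lemma k s.toList [] (by simp [scanA])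
  simp only [List.nil_append] at this
  rw [this]
  rfl
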